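-- pv_equiv track=rewrite | github.com/HarshaKamakshigari/SentinelX | sentinelx/risk/heuristic_risk.py | check_lolbins
-- ===== SOURCE A (Python) =====
-- SUSPICIOUS_LOLBINS = [
--     "rundll32",
--     "mshta",
--     "regsvr32",
--     "bitsadmin",
--     "certutil",
-- ]
--
-- def check_lolbins(cmd: str | None) -> int:
--     if not cmd:
--         return 0
--     cmd = cmd.lower()
--     for tool in SUSPICIOUS_LOLBINS:
--         if tool in cmd:
--             return 1
--     return 0
-- ===== SOURCE B (Python) =====
-- # B: single left-to-right scan over the command, dispatching on the first
-- # character to the (at most two) LOLBin names that could start there,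
-- # instead of A's per-name substring search over the whole string.
--
-- _BY_FIRST = {
--     "r": ("rundll32", "regsvr32"),
--     "m": ("mshta",),
--     "b": ("bitsadmin",),
--     "c": ("certutil",),
-- }
--
-- def check_lolbins(cmd):
--     if not cmd:
--         return 0
--     low = cmd.lower()
--     for i, ch in enumerate(low):
--         for tool in _BY_FIRST.get(ch, ()):
--             if low.startswith(tool, i):
--                 return 1
--     return 0
-- ===== Notes on version B (the rewrite author's own statement) =====
-- stated objective: alternative
-- what changed: Replaces A's loop of five whole-string substring-membership tests by one left-to-right scan of the string that, at each position, dispatches on the current character to the at-most-two names that could start there and checks a prefix match.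
import Mathlib
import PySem

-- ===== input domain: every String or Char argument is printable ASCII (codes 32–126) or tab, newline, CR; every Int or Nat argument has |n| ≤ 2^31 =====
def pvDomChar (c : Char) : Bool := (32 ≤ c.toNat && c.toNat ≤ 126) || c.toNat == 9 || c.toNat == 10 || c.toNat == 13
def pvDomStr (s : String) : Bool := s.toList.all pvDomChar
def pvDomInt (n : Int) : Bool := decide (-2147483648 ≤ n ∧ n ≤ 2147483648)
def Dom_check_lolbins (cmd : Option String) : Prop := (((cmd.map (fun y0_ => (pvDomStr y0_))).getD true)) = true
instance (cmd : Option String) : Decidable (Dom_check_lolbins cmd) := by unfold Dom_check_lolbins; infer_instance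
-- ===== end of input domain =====

-- B replaces A's per-name whole-string substring loop by one left-to-right scan
-- with a first-character dispatch to the candidate names; same result, alternative algorithm.


-- ===== PORT A =====
def SUSPICIOUS_LOLBINS : List String := ["rundll32", "mshta", "regsvr32", "bitsadmin", "certutil"]

-- A's 'for tool in SUSPICIOUS_LOLBINS: if tool in cmd: return 1' loop
def checkLoop (low : String) : List String → Int
  | [] => 0
  | t :: ts => if PySem.Str.isIn t low then 1 else checkLoop low ts

def check_lolbins (cmd : Option String) : Int :=
  match cmd with
  | none => 0
  | some s => if s = "" then 0 else checkLoop (PySem.Str.lower s) SUSPICIOUS_LOLBINS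

-- ===== PORT B =====
-- B's _BY_FIRST.get(ch, ())
def namesFor (c : Char) : List String :=
  if c = 'r' then ["rundll32", "regsvr32"]
  else if c = 'm' then ["mshta"]
  else if c = 'b' then ["bitsadmin"]
  else if c = 'c' then ["certutil"]
  else []

-- B's scan: position i ↦ the suffix starting at i; low.startswith(tool, i) is a prefix test on that suffix
def bScan : List Char → Bool
  | [] => false
  | c :: rest => (namesFor c).any (fun t => PySem.Chars.startswith (c :: rest) t.toList) || bScan rest

def check_lolbins_alt (cmd : Option String) : Int :=
  match cmd with
  | none => 0
  | some s => if s = "" then 0 else if bScan (PySem.Chars.lower s.toList) then 1 else 0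

-- ===== PRECONDITION & SPEC =====
def Spec_check_lolbins (cmd : Option String) (out : Int) : Prop := out = check_lolbins_alt cmd
instance (cmd : Option String) (out : Int) : Decidable (Spec_check_lolbins cmd out) := by unfold Spec_check_lolbins; infer_instance

-- ===== CLAIM (what is proved, stated in full; the proofs are below) =====
def Claim_equal_check_lolbins : Prop := ∀ (cmd : Option String), Dom_check_lolbins cmd → Spec_check_lolbins cmd (check_lolbins cmd)

-- ===== LEMMAS AND PROOFS =====

-- A's early-return loop is 'any of the names occurs'
theorem checkLoop_eq (low : String) (ts : List String) :
    checkLoop low ts = if ts.any (fun t => PySem.Str.isIn t low) then 1 else 0 := by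
  induction ts with
  | nil => rfl
  | cons t ts ih =>
    rw [checkLoop, ih, List.any_cons]
    cases hq : PySem.Str.isIn t low <;> simp

-- the first-character dispatch loses no candidate: a name can only be a prefix when its first char matches
theorem namesFor_any_eq (c : Char) (rest : List Char) :
    (namesFor c).any (fun t => PySem.Chars.startswith (c :: rest) t.toList)
      = SUSPICIOUS_LOLBINS.any (fun t => PySem.Chars.startswith (c :: rest) t.toList) := by
  have hpre : ∀ (t : List Char), t ≠ [] → t.head? ≠ some c →
      PySem.Chars.startswith (c :: rest) t = false := by
    intro t h1 h2
    rw [← Bool.not_eq_true, PySem.Chars.startswith_iff]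
    intro hp
    cases t with
    | nil => exact h1 rfl
    | cons a l => exact h2 (by rw [List.head?_cons, (List.cons_prefix_cons.mp hp).1])
  by_cases hr : c = 'r'
  · subst hr
    simp [namesFor, SUSPICIOUS_LOLBINS,
      hpre ['m','s','h','t','a'] (by decide) (by decide),
      hpre ['b','i','t','s','a','d','m','i','n'] (by decide) (by decide),
      hpre ['c','e','r','t','u','t','i','l'] (by decide) (by decide)]
  by_cases hm : c = 'm'
  · subst hm
    simp [namesFor, SUSPICIOUS_LOLBINS,
      hpre ['r','u','n','d','l','l','3','2'] (by decide) (by decide),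
      hpre ['r','e','g','s','v','r','3','2'] (by decide) (by decide),
      hpre ['b','i','t','s','a','d','m','i','n'] (by decide) (by decide),
      hpre ['c','e','r','t','u','t','i','l'] (by decide) (by decide)]
  by_cases hb : c = 'b'
  · subst hb
    simp [namesFor, SUSPICIOUS_LOLBINS,
      hpre ['r','u','n','d','l','l','3','2'] (by decide) (by decide),
      hpre ['m','s','h','t','a'] (by decide) (by decide),
      hpre ['r','e','g','s','v','r','3','2'] (by decide) (by decide),
      hpre ['c','e','r','t','u','t','i','l'] (by decide) (by decide)]
  by_cases hc : c = 'c'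
  · subst hc
    simp [namesFor, SUSPICIOUS_LOLBINS,
      hpre ['r','u','n','d','l','l','3','2'] (by decide) (by decide),
      hpre ['m','s','h','t','a'] (by decide) (by decide),
      hpre ['r','e','g','s','v','r','3','2'] (by decide) (by decide),
      hpre ['b','i','t','s','a','d','m','i','n'] (by decide) (by decide)]
  · simp [namesFor, SUSPICIOUS_LOLBINS, hr, hm, hb, hc,
      hpre ['r','u','n','d','l','l','3','2'] (by decide) (by simpa [eq_comm] using hr),
      hpre ['m','s','h','t','a'] (by decide) (by simpa [eq_comm] using hm),
      hpre ['r','e','g','s','v','r','3','2'] (by decide) (by simpa [eq_comm] using hr),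
      hpre ['b','i','t','s','a','d','m','i','n'] (by decide) (by simpa [eq_comm] using hb),
      hpre ['c','e','r','t','u','t','i','l'] (by decide) (by simpa [eq_comm] using hc)]

-- B's scan finds exactly the infix occurrences of some name
theorem bScan_iff (cs : List Char) :
    bScan cs = true ↔ ∃ t ∈ SUSPICIOUS_LOLBINS, t.toList <:+: cs := by
  induction cs with
  | nil =>
    simp only [bScan, Bool.false_eq_true, false_iff]
    rintro ⟨t, ht, hinf⟩
    have : t.toList = [] := List.eq_nil_of_infix_nil hinf
    fin_cases ht <;> simp_all
  | cons c rest ih =>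
    simp only [bScan, Bool.or_eq_true, namesFor_any_eq, List.any_eq_true, ih]
    constructor
    · rintro (⟨t, ht, hs⟩ | ⟨t, ht, hinf⟩)
      · exact ⟨t, ht, ((PySem.Chars.startswith_iff _ _).mp hs).isInfix⟩
      · exact ⟨t, ht, hinf.trans (List.infix_cons_iff.mpr (Or.inr (List.infix_refl _)))⟩
    · rintro ⟨t, ht, hinf⟩
      rcases List.infix_cons_iff.mp hinf with hp | hi
      · exact Or.inl ⟨t, ht, (PySem.Chars.startswith_iff _ _).mpr hp⟩
      · exact Or.inr ⟨t, ht, hi⟩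

-- ===== VERDICT (by name: the statement is the Claim_ definition above) =====
theorem check_lolbins_spec : Claim_equal_check_lolbins := by
  intro cmd _
  unfold Spec_check_lolbins check_lolbins check_lolbins_alt
  cases cmd with
  | none => rfl
  | some s =>
    by_cases hs : s = ""
    · simp [hs]
    · have key : (SUSPICIOUS_LOLBINS.any fun t => PySem.Str.isIn t (PySem.Str.lower s))
          = bScan (PySem.Chars.lower s.toList) := by
        rw [Bool.eq_iff_iff, List.any_eq_true, bScan_iff]
        constructor <;> rintro ⟨t, ht, h⟩ <;> refine ⟨t, ht, ?_⟩
        · have := (PySem.Str.isIn_iff_infix t _).mp h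
          rwa [PySem.Str.toList_lower] at this
        · exact (PySem.Str.isIn_iff_infix t _).mpr (by rwa [PySem.Str.toList_lower])
      simp only [hs, if_false, checkLoop_eq, key]
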